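-- pv_equiv track=rewrite | github.com/2yuna13/Algorithm | 프로그래머스/0/181851. 전국 대회 선발 고사/전국 대회 선발 고사.py | solution
-- ===== SOURCE A (Python) =====
-- def solution(rank, attendance):
--     answer = []
--     for i, p  in zip(rank, attendance):
--         if p == True:
--             answer.append(i)
--
--     answer.sort()
--
--     a = rank.index(answer[0])
--     b = rank.index(answer[1])
--     c = rank.index(answer[2])
--
--     return 10000 * a + 100 * b + c
-- ===== SOURCE B (Python) =====
-- def solution(rank, attendance):
--     # Bounded selection in one pass: keep only the three smallest attended rank
--     # values in a 3-slot insertion buffer instead of collecting and sorting all.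
--     best = []  # ascending, at most 3 values
--     for r, p in zip(rank, attendance):
--         if p == True:
--             j = len(best)
--             while j > 0 and best[j - 1] > r:
--                 j -= 1
--             best.insert(j, r)
--             if len(best) > 3:
--                 best.pop()
--     x, y, z = best
--     return 10000 * rank.index(x) + 100 * rank.index(y) + rank.index(z)
-- ===== Notes on version B (the rewrite author's own statement) =====
-- stated objective: alternative
-- what changed: B replaces A's collect-all-attendees-then-sort pipeline by a single pass that maintains only the three smallest attended values in a bounded 3-slot insertion buffer (constant extra space, no full sort), then maps those three values to positions with rank.index as A does.
import Mathlib
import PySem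

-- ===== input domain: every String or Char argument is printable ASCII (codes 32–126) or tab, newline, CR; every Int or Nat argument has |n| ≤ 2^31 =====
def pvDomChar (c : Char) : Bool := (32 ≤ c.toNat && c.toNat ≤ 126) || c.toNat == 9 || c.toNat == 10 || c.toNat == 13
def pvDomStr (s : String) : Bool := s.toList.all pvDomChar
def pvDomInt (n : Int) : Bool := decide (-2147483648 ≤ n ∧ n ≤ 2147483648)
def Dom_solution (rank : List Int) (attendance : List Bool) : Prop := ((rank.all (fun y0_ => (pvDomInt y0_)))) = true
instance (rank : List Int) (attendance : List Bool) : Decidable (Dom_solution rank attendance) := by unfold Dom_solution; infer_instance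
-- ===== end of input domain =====

-- B keeps only the three smallest attended values in a one-pass bounded 3-slot insertion buffer instead of A's collect-all-then-sort; proved equal whenever at least three contestants attend (A raises IndexError below three).


-- ===== PORT A =====
def solution (rank : List Int) (attendance : List Bool) : Int :=
  let answer := (rank.zip attendance).foldl
    (fun acc ip => if ip.2 == true then acc ++ [ip.1] else acc) []
  let answer := PySem.List.sorted answer (fun x => x) false
  match PySem.List.pyGet? answer 0, PySem.List.pyGet? answer 1, PySem.List.pyGet? answer 2 with
  | some v0, some v1, some v2 =>
    match PySem.List.index? rank v0, PySem.List.index? rank v1, PySem.List.index? rank v2 with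
    | some a, some b, some c => 10000 * (a : Int) + 100 * (b : Int) + (c : Int)
    | _, _, _ => 0          -- unreachable: each v came from rank
  | _, _, _ => 0            -- Python raises IndexError here; excluded by Pre_

-- ===== PORT B =====
-- exact: B's backward while-scan places the new value after all values ≤ r,
-- i.e. before the first strictly greater value; insVal does the same front-to-back.
def insVal (r : Int) : List Int → List Int
  | [] => [r]
  | q :: t => if q > r then r :: q :: t else q :: insVal r t

-- best.insert(j, r) followed by the conditional best.pop()
def capIns (r : Int) (acc : List Int) : List Int :=
  let b := insVal r acc
  if b.length > 3 then b.dropLast else b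

def solution_alt (rank : List Int) (attendance : List Bool) : Int :=
  let best := (rank.zip attendance).foldl
    (fun best ip => if ip.2 == true then capIns ip.1 best else best) []
  match best with
  | [x, y, z] =>
    match PySem.List.index? rank x with
    | none => 0             -- unreachable: each value came from rank
    | some a =>
      match PySem.List.index? rank y with
      | none => 0
      | some b =>
        match PySem.List.index? rank z with
        | none => 0
        | some c => 10000 * (a : Int) + 100 * (b : Int) + (c : Int)
  | _ => 0                  -- Python raises ValueError (unpack) here; excluded by Pre_

-- ===== PRECONDITION & SPEC =====
-- Pre_ excludes exactly the inputs with fewer than three attending contestants,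
-- on which A raises IndexError (and B raises ValueError).
def Pre_solution (rank : List Int) (attendance : List Bool) : Prop :=
  3 ≤ (rank.zip attendance).countP (fun ip => ip.2)
instance (rank : List Int) (attendance : List Bool) : Decidable (Pre_solution rank attendance) := by unfold Pre_solution; infer_instance
def pvWitness_solution : List Int × List Bool := ([3, 1, 2], [true, true, true])

def Spec_solution (rank : List Int) (attendance : List Bool) (out : Int) : Prop := out = solution_alt rank attendance
instance (rank : List Int) (attendance : List Bool) (out : Int) : Decidable (Spec_solution rank attendance out) := by unfold Spec_solution; infer_instance

-- ===== CLAIM (what is proved, stated in full; the proofs are below) =====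
def Claim_equal_solution : Prop := ∀ (rank : List Int) (attendance : List Bool), Dom_solution rank attendance → Pre_solution rank attendance → Spec_solution rank attendance (solution rank attendance)

-- ===== LEMMAS AND PROOFS =====
lemma pvLenIns (r : Int) (l : List Int) : (insVal r l).length = l.length + 1 := by
  induction l with
  | nil => rfl
  | cons q t ih => simp only [insVal]; split <;> simp [ih]

lemma pvInsPerm (r : Int) (l : List Int) : (insVal r l).Perm (r :: l) := by
  induction l with
  | nil => rfl
  | cons q t ih =>
    simp only [insVal]; split
    · rfl
    · exact (ih.cons q).trans (List.Perm.swap r q t)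

lemma pvMemIns (x r : Int) (l : List Int) : x ∈ insVal r l ↔ x = r ∨ x ∈ l := by
  have := (pvInsPerm r l).mem_iff (a := x); simpa using this

lemma pvInsPairwise (r : Int) (l : List Int) (h : l.Pairwise (· ≤ ·)) :
    (insVal r l).Pairwise (· ≤ ·) := by
  induction l with
  | nil => simp [insVal]
  | cons q t ih =>
    simp only [insVal]
    rcases List.pairwise_cons.mp h with ⟨hq, ht⟩
    split
    · rename_i hlt
      refine List.pairwise_cons.mpr ⟨?_, h⟩
      intro b hb
      rcases List.mem_cons.mp hb with rfl | hb
      · exact le_of_lt hlt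
      · exact le_trans (le_of_lt hlt) (hq b hb)
    · rename_i hge
      refine List.pairwise_cons.mpr ⟨?_, ih ht⟩
      intro b hb
      rcases (pvMemIns b r t).mp hb with rfl | hb
      · omega
      · exact hq b hb

lemma pvFoldInsPerm (vs : List Int) (b : List Int) :
    (vs.foldl (fun acc r => insVal r acc) b).Perm (vs ++ b) := by
  induction vs generalizing b with
  | nil => simp
  | cons r t ih =>
    simp only [List.foldl_cons, List.cons_append]
    exact (ih (insVal r b)).trans
      ((List.Perm.append_left t (pvInsPerm r b)).trans List.perm_middle)

lemma pvFoldInsPairwise (vs : List Int) (b : List Int) (h : b.Pairwise (· ≤ ·)) :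
    (vs.foldl (fun acc r => insVal r acc) b).Pairwise (· ≤ ·) := by
  induction vs generalizing b with
  | nil => exact h
  | cons r t ih => exact ih _ (pvInsPairwise r b h)

-- truncating the buffer to 3 before or after an insertion gives the same first 3 elements
lemma pvTakeIns (n : Nat) (r : Int) (l : List Int) :
    (insVal r (l.take n)).take n = (insVal r l).take n := by
  induction l generalizing n with
  | nil => simp
  | cons q t ih =>
    cases n with
    | zero => simp
    | succ m =>
      simp only [List.take_succ_cons, insVal]
      by_cases hc : q > r
      · simp only [if_pos hc, List.take_succ_cons]
        cases m with
        | zero => simp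
        | succ s => simp [List.take_succ_cons, List.take_take]
      · simp only [if_neg hc, List.take_succ_cons]
        rw [ih m]

lemma pvFoldTakeCongr (t : List Int) (b b' : List Int) (h : b.take 3 = b'.take 3) :
    (t.foldl (fun acc r => insVal r acc) b).take 3
      = (t.foldl (fun acc r => insVal r acc) b').take 3 := by
  induction t generalizing b b' with
  | nil => exact h
  | cons r s ih =>
    simp only [List.foldl_cons]
    exact ih _ _ (by rw [← pvTakeIns 3 r b, h, pvTakeIns 3 r b'])

lemma pvCapIns (r : Int) (b : List Int) (hb : b.length ≤ 3) :
    capIns r b = (insVal r b).take 3 := by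
  have hlen : (insVal r b).length = b.length + 1 := pvLenIns r b
  simp only [capIns]
  split
  · rename_i hgt
    rw [List.dropLast_eq_take]
    congr 1; omega
  · rename_i hle
    exact (List.take_of_length_le (by omega)).symm

-- B's capped loop computes the first three elements of the full insertion sort
lemma pvCapFold (vs : List Int) (b : List Int) (hb : b.length ≤ 3) :
    vs.foldl (fun acc r => capIns r acc) b
      = (vs.foldl (fun acc r => insVal r acc) b).take 3 := by
  induction vs generalizing b with
  | nil => exact (List.take_of_length_le hb).symm
  | cons r t ih =>
    simp only [List.foldl_cons]
    rw [pvCapIns r b hb, ih _ (by rw [List.length_take]; omega)]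
    exact pvFoldTakeCongr t _ _ (by simp [List.take_take])

-- the guarded loop over the zipped lists is the plain insertion fold over the attended values
lemma pvGuardFold (l : List (Int × Bool)) (b : List Int) :
    l.foldl (fun best ip => if ip.2 == true then capIns ip.1 best else best) b
      = ((l.filter (fun ip => ip.2)).map (fun ip => ip.1)).foldl
          (fun acc r => capIns r acc) b := by
  induction l generalizing b with
  | nil => rfl
  | cons z t ih =>
    simp only [List.foldl_cons, List.filter_cons]
    cases hz : z.2
    · rw [if_neg (by decide), if_neg (by decide)]
      exact ih _
    · rw [if_pos (by decide), if_pos (by decide)]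
      rw [List.map_cons, List.foldl_cons]
      exact ih _

lemma pvMain (rank : List Int) (attendance : List Bool)
    (hpre : 3 ≤ (rank.zip attendance).countP (fun ip => ip.2)) :
    solution rank attendance = solution_alt rank attendance := by
  simp only [solution, solution_alt]
  set zs := rank.zip attendance with hzs
  -- B's loop
  rw [pvGuardFold, pvCapFold _ _ (by simp)]
  -- A's loop
  rw [PySem.List.foldl_append_if]
  simp only [List.nil_append]
  have hbeq : (fun ip : Int × Bool => ip.2 == true) = (fun ip : Int × Bool => ip.2) := by
    funext ip; exact beq_true ip.2
  rw [hbeq]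
  set answer := (zs.filter (fun ip => ip.2)).map (fun ip => ip.1) with hans
  set S := answer.foldl (fun acc r => insVal r acc) [] with hS
  -- sorted(answer) IS the insertion-sorted S: both are ≤-sorted rearrangements of answer
  have hSperm : S.Perm answer := by simpa using pvFoldInsPerm answer []
  have hSpair : S.Pairwise (· ≤ ·) := pvFoldInsPairwise answer [] (by simp)
  have hsorted : PySem.List.sorted answer (fun x => x) false = S := by
    refine ((PySem.List.sorted_perm answer (fun x => x) false).trans hSperm.symm).eq_of_pairwise
      (fun _ _ _ _ h1 h2 => le_antisymm h1 h2) ?_ hSpair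
    simpa using PySem.List.sorted_pairwise answer (fun x => x)
  -- S has at least three elements
  have hlenS : 3 ≤ S.length := by
    have h1 := hSperm.length_eq
    rw [hans, List.length_map, ← List.countP_eq_length_filter] at h1
    omega
  obtain ⟨x, y, z, rest, hSeq⟩ : ∃ x y z rest, S = x :: y :: z :: rest := by
    rcases hE : S with _ | ⟨x, _ | ⟨y, _ | ⟨z, rest⟩⟩⟩ <;>
      rw [hE] at hlenS <;> simp at hlenS
    exact ⟨x, y, z, rest, rfl⟩
  rw [hsorted, hSeq]
  have hg0 : PySem.List.pyGet? (x :: y :: z :: rest) 0 = some x := by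
    simp [PySem.List.pyGet?_zero]
  have hg1 : PySem.List.pyGet? (x :: y :: z :: rest) 1 = some y := by
    rw [show (1 : Int) = ((1 : Nat) : Int) by norm_num, PySem.List.pyGet?_natCast]; rfl
  have hg2 : PySem.List.pyGet? (x :: y :: z :: rest) 2 = some z := by
    rw [show (2 : Int) = ((2 : Nat) : Int) by norm_num, PySem.List.pyGet?_natCast]; rfl
  rw [hg0, hg1, hg2]
  dsimp only [List.take]
  cases PySem.List.index? rank x <;> cases PySem.List.index? rank y <;>
    cases PySem.List.index? rank z <;> rfl

-- ===== VERDICT (by name: the statement is the Claim_ definition above) =====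
theorem solution_spec : Claim_equal_solution := by
  intro rank attendance _ hpre
  exact pvMain rank attendance hpre
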